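-- pv_equiv track=rewrite | github.com/sfc-gh-dszmolka/universal-driver | pep249_dbapi/ci/reference_tests/compare_reports.py | categorize_test_outcomes
-- ===== SOURCE A (Python) =====
-- from typing import Dict, Iterable, Set
--
-- def categorize_test_outcomes(outcomes: Dict[str, str]) -> Dict[str, Set[str]]:
--     """Categorize tests by outcome in a single pass."""
--     categories = {
--         "passed": set(),
--         "failed": set(),
--         "skipped": set()
--     }
--
--     for test_id, outcome in outcomes.items():
--         if outcome == "passed":
--             categories["passed"].add(test_id)
--         elif outcome in ("failed", "error"):
--             categories["failed"].add(test_id)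
--         elif outcome == "skipped":
--             categories["skipped"].add(test_id)
--
--     return categories
-- ===== SOURCE B (Python) =====
-- def categorize_test_outcomes(outcomes):
--     """Categorize tests by outcome: one independent filtering pass per category."""
--     return {
--         "passed": {t for t, o in outcomes.items() if o == "passed"},
--         "failed": {t for t, o in outcomes.items() if o in ("failed", "error")},
--         "skipped": {t for t, o in outcomes.items() if o == "skipped"},
--     }
-- ===== Notes on version B (the rewrite author's own statement) =====
-- stated objective: alternative
-- what changed: Replaces the single pass with per-element branch dispatch by three independent set-comprehension filtering passes, one per category.
import Mathlib
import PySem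

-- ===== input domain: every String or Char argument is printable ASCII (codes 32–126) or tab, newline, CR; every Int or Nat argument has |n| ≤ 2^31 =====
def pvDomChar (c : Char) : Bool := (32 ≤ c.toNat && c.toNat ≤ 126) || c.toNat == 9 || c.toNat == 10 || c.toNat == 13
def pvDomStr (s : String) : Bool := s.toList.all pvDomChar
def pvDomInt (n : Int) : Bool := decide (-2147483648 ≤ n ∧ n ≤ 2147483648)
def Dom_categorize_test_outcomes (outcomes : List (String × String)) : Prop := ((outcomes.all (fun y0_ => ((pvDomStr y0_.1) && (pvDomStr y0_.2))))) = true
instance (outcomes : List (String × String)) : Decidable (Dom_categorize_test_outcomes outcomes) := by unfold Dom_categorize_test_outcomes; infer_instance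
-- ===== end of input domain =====

-- B rebuilds each category by its own filtering pass instead of A's single branching loop (alternative decomposition, same cost).


-- ===== PORT A =====
def pvStep (c : PySem.Set String × PySem.Set String × PySem.Set String)
    (x : String × String) : PySem.Set String × PySem.Set String × PySem.Set String :=
  if x.2 == "passed" then (PySem.Set.add c.1 x.1, c.2.1, c.2.2)
  else if x.2 == "failed" || x.2 == "error" then (c.1, PySem.Set.add c.2.1 x.1, c.2.2)
  else if x.2 == "skipped" then (c.1, c.2.1, PySem.Set.add c.2.2 x.1)
  else c

-- single pass: one loop over outcomes.items(), branch per element (the dict with the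
-- three fixed literal keys is represented as a triple assembled into the result list)
def categorize_test_outcomes (outcomes : List (String × String)) : List (String × List String) :=
  let cats := outcomes.foldl pvStep ([], [], [])
  [("passed", cats.1), ("failed", cats.2.1), ("skipped", cats.2.2)]

-- ===== PORT B =====
-- three independent filtering passes, one set comprehension per category
def categorize_test_outcomes_alt (outcomes : List (String × String)) : List (String × List String) :=
  [("passed", PySem.Set.ofList ((outcomes.filter (fun x => x.2 == "passed")).map (·.1))),
   ("failed", PySem.Set.ofList ((outcomes.filter (fun x => x.2 == "failed" || x.2 == "error")).map (·.1))),
   ("skipped", PySem.Set.ofList ((outcomes.filter (fun x => x.2 == "skipped")).map (·.1)))]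

-- ===== PRECONDITION & SPEC =====
def Spec_categorize_test_outcomes (outcomes : List (String × String)) (out : List (String × List String)) : Prop := out = categorize_test_outcomes_alt outcomes
instance (outcomes : List (String × String)) (out : List (String × List String)) : Decidable (Spec_categorize_test_outcomes outcomes out) := by unfold Spec_categorize_test_outcomes; infer_instance

-- ===== CLAIM (what is proved, stated in full; the proofs are below) =====
def Claim_equal_categorize_test_outcomes : Prop := ∀ (outcomes : List (String × String)), Dom_categorize_test_outcomes outcomes → Spec_categorize_test_outcomes outcomes (categorize_test_outcomes outcomes)

-- ===== LEMMAS AND PROOFS =====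
theorem pvLoop_eq (xs : List (String × String))
    (p f s : PySem.Set String) :
    xs.foldl pvStep (p, f, s) =
      (((xs.filter (fun x => x.2 == "passed")).map (·.1)).foldl PySem.Set.add p,
       ((xs.filter (fun x => x.2 == "failed" || x.2 == "error")).map (·.1)).foldl PySem.Set.add f,
       ((xs.filter (fun x => x.2 == "skipped")).map (·.1)).foldl PySem.Set.add s) := by
  induction xs generalizing p f s with
  | nil => rfl
  | cons x xs ih =>
    simp only [List.foldl_cons, pvStep]
    by_cases h1 : x.2 = "passed"
    · simp [List.filter_cons, h1, ih]
    · by_cases h2 : x.2 = "failed"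
      · simp [List.filter_cons, h1, h2, ih]
      · by_cases h3 : x.2 = "error"
        · simp [List.filter_cons, h1, h2, h3, ih]
        · by_cases h4 : x.2 = "skipped" <;> simp [List.filter_cons, h1, h2, h3, h4, ih]

-- ===== VERDICT (by name: the statement is the Claim_ definition above) =====
theorem categorize_test_outcomes_spec : Claim_equal_categorize_test_outcomes := by
  intro outcomes _
  show _ = _
  simp [categorize_test_outcomes, categorize_test_outcomes_alt, pvLoop_eq,
    PySem.Set.ofList_eq_foldl]
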